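-- pv_equiv track=rewrite | github.com/SMaric93/CEO-Market | src/whogetsconsidered/shocks/releases.py | _release_tier
-- ===== SOURCE A (Python) =====
-- def _release_tier(event_type: str) -> str:
--     normalized = event_type.casefold()
--     if any(token in normalized for token in ("merger", "acquisition", "consolidation", "hq_exit")):
--         return "A" if "distress" not in normalized else "C"
--     if "tier_b" in normalized or "hq exit" in normalized:
--         return "B"
--     if any(token in normalized for token in ("bankruptcy", "distress", "liquidation", "tier_c")):
--         return "C"
--     return "B"
-- ===== SOURCE B (Python) =====
-- # Branch-free rewrite: encode the four token-group hits as a 4-bit index and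
-- # look the tier up in a precomputed 16-entry truth table (no if-chain at all).
-- _TABLE = ["B", "C", "B", "B", "C", "C", "B", "B",
--           "A", "A", "A", "A", "C", "C", "C", "C"]
--
-- def _release_tier(event_type: str) -> str:
--     t = event_type.casefold()
--     def hit(*tokens):
--         return any(token in t for token in tokens)
--     idx = (8 * hit("merger", "acquisition", "consolidation", "hq_exit")
--            + 4 * hit("distress")
--            + 2 * hit("tier_b", "hq exit")
--            + hit("bankruptcy", "liquidation", "tier_c"))
--     return _TABLE[idx]
-- ===== Notes on version B (the rewrite author's own statement) =====
-- stated objective: alternative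
-- what changed: Replaces the nested if-chain with a branch-free computation: the four token-group hits form a 4-bit index into a precomputed 16-entry truth table of tiers.
import Mathlib
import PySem

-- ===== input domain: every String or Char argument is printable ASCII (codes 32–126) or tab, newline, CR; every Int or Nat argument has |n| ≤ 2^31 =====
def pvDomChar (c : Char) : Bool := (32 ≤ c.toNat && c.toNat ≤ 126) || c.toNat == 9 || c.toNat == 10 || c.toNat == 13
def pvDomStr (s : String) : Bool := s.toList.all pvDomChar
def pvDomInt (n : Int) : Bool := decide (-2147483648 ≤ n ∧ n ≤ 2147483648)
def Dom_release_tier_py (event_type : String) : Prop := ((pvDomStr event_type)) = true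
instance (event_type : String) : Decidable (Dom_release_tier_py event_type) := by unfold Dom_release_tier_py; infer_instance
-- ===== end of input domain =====

-- B replaces A's nested if-chain with a branch-free 4-bit index into a precomputed truth table of tiers; objective: alternative.


-- ===== PORT A =====
-- casefold on the printable-ASCII domain coincides with lower (exact here)
def release_tier_py (event_type : String) : String :=
  let normalized := PySem.Str.lower event_type
  if (["merger", "acquisition", "consolidation", "hq_exit"].any
        (fun token => PySem.Str.isIn token normalized)) then
    (if !(PySem.Str.isIn "distress" normalized) then "A" else "C")
  else if (PySem.Str.isIn "tier_b" normalized || PySem.Str.isIn "hq exit" normalized) then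
    "B"
  else if (["bankruptcy", "distress", "liquidation", "tier_c"].any
        (fun token => PySem.Str.isIn token normalized)) then
    "C"
  else
    "B"

-- ===== PORT B =====
def pvTable : List String :=
  ["B", "C", "B", "B", "C", "C", "B", "B",
   "A", "A", "A", "A", "C", "C", "C", "C"]

def release_tier_py_alt (event_type : String) : String :=
  let t := PySem.Str.lower event_type
  let hit := fun (tokens : List String) => tokens.any (fun token => PySem.Str.isIn token t)
  let idx : Int :=
    8 * (if hit ["merger", "acquisition", "consolidation", "hq_exit"] then 1 else 0)
    + 4 * (if hit ["distress"] then 1 else 0)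
    + 2 * (if hit ["tier_b", "hq exit"] then 1 else 0)
    + (if hit ["bankruptcy", "liquidation", "tier_c"] then 1 else 0)
  -- _TABLE[idx]: idx is always in range 0..15, so the IndexError default never fires
  (PySem.List.pyGet? pvTable idx).getD ""

-- ===== PRECONDITION & SPEC =====
def Spec_release_tier_py (event_type : String) (out : String) : Prop := out = release_tier_py_alt event_type
instance (event_type : String) (out : String) : Decidable (Spec_release_tier_py event_type out) := by unfold Spec_release_tier_py; infer_instance

-- ===== CLAIM (what is proved, stated in full; the proofs are below) =====
def Claim_equal_release_tier_py : Prop := ∀ (event_type : String), Dom_release_tier_py event_type → Spec_release_tier_py event_type (release_tier_py event_type)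

-- ===== LEMMAS AND PROOFS =====
-- Both ports, after reducing the literal `.any` scans, are these two Bool-parameterised forms.
def pvAForm (m a c h d tb hq bk lq tc : Bool) : String :=
  if (m || (a || (c || (h || false)))) then (if !d then "A" else "C")
  else if (tb || hq) then "B"
  else if (bk || (d || (lq || (tc || false)))) then "C"
  else "B"

def pvBForm (m a c h d tb hq bk lq tc : Bool) : String :=
  (PySem.List.pyGet? pvTable
    (8 * (if (m || (a || (c || (h || false)))) then 1 else 0)
     + 4 * (if (d || false) then 1 else 0)
     + 2 * (if (tb || (hq || false)) then 1 else 0)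
     + (if (bk || (lq || (tc || false))) then 1 else 0))).getD ""

theorem pvKey : ∀ m a c h d tb hq bk lq tc : Bool,
    pvAForm m a c h d tb hq bk lq tc = pvBForm m a c h d tb hq bk lq tc := by decide

-- ===== VERDICT (by name: the statement is the Claim_ definition above) =====
set_option maxHeartbeats 1000000 in
theorem release_tier_py_spec : Claim_equal_release_tier_py := by
  intro s _
  unfold Spec_release_tier_py
  exact pvKey
    (PySem.Str.isIn "merger" (PySem.Str.lower s))
    (PySem.Str.isIn "acquisition" (PySem.Str.lower s))
    (PySem.Str.isIn "consolidation" (PySem.Str.lower s))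
    (PySem.Str.isIn "hq_exit" (PySem.Str.lower s))
    (PySem.Str.isIn "distress" (PySem.Str.lower s))
    (PySem.Str.isIn "tier_b" (PySem.Str.lower s))
    (PySem.Str.isIn "hq exit" (PySem.Str.lower s))
    (PySem.Str.isIn "bankruptcy" (PySem.Str.lower s))
    (PySem.Str.isIn "liquidation" (PySem.Str.lower s))
    (PySem.Str.isIn "tier_c" (PySem.Str.lower s))
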